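-- pv_equiv track=rewrite | github.com/ksaigon/ksaigon-advent-of-code-2025 | day9/part2_brute_force.py | largest_rectangle_in_bounds
-- ===== SOURCE A (Python) =====
-- from collections import defaultdict
--
-- def largest_rectangle_in_bounds(coordinates):
--     n = len(coordinates)
--     row_intervals = defaultdict(set)
--     for i in range(1, len(coordinates) + 1):
--         pr, pc = coordinates[(i-1) % n] # handle wrap
--         r, c = coordinates[i % n]
--         for row in range(min(pr, r), max(pr, r)+1):
--                 row_intervals[row].update([c, pc])
--     for row in row_intervals: row_intervals[row] = sorted(list(row_intervals[row]))
--
--     res = 0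
--     for i in range(len(coordinates)):
--         for j in range(i+1, len(coordinates)):
--             r1, c1 = coordinates[i]
--             r2, c2 = coordinates[j]
--
--             bottom_row, top_row = min(r1, r2), max(r1, r2)
--             left_col, right_col = min(c1, c2), max(c1, c2)
--             is_valid = True
--             for row in range(bottom_row, top_row + 1):
--                 if left_col < row_intervals[row][0] or right_col > row_intervals[row][-1]:
--                     is_valid = False
--                     break
--             if is_valid:
--                 area = (top_row - bottom_row + 1) * (right_col - left_col + 1)
--                 res = max(res, area)
--     return res
-- ===== SOURCE B (Python) =====
-- def largest_rectangle_in_bounds(coordinates):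
--     n = len(coordinates)
--     if n == 0:
--         return 0
--     # Pass 1: running per-row column bounds (lo = leftmost, hi = rightmost boundary
--     # column on that row), one min/max update per covered row -- no sets, no sorting.
--     lo = {}
--     hi = {}
--     for k in range(n):
--         pr, pc = coordinates[k]
--         r, c = coordinates[(k + 1) % n]
--         cl = pc if pc < c else c
--         ch = pc if pc > c else c
--         for row in range(min(pr, r), max(pr, r) + 1):
--             if row in lo:
--                 if cl < lo[row]:
--                     lo[row] = cl
--                 if ch > hi[row]:
--                     hi[row] = ch
--             else:
--                 lo[row] = cl
--                 hi[row] = ch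
--     # Pass 2: compress to the distinct coordinate rows and tabulate, for every pair
--     # (a, b) of distinct-row indices, the range aggregates
--     #   Tmax[a][b-a] = max(lo[row] for rows[a] <= row <= rows[b])
--     #   Tmin[a][b-a] = min(hi[row] for rows[a] <= row <= rows[b])
--     # built in O(R + k^2) from per-gap aggregates, so each pair check is O(1).
--     rows = sorted(set(r for r, _ in coordinates))
--     k2 = len(rows)
--     idx = {r: i for i, r in enumerate(rows)}
--     segmax = []
--     segmin = []
--     for i in range(k2 - 1):
--         mx = lo.get(rows[i], 0)
--         mn = hi.get(rows[i], 0)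
--         for row in range(rows[i] + 1, rows[i + 1] + 1):
--             v = lo.get(row, 0)
--             if v > mx:
--                 mx = v
--             w = hi.get(row, 0)
--             if w < mn:
--                 mn = w
--         segmax.append(mx)
--         segmin.append(mn)
--     Tmax = []
--     Tmin = []
--     for a in range(k2):
--         rowmax = [lo.get(rows[a], 0)]
--         rowmin = [hi.get(rows[a], 0)]
--         for b in range(a + 1, k2):
--             rowmax.append(max(rowmax[-1], segmax[b - 1]))
--             rowmin.append(min(rowmin[-1], segmin[b - 1]))
--         Tmax.append(rowmax)
--         Tmin.append(rowmin)
--     best = 0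
--     for i in range(n):
--         r1, c1 = coordinates[i]
--         for j in range(i + 1, n):
--             r2, c2 = coordinates[j]
--             a = idx[r1]
--             b = idx[r2]
--             if a > b:
--                 a, b = b, a
--             left = c1 if c1 < c2 else c2
--             right = c1 if c1 > c2 else c2
--             if Tmax[a][b - a] <= left and right <= Tmin[a][b - a]:
--                 area = (rows[b] - rows[a] + 1) * (right - left + 1)
--                 if area > best:
--                     best = area
--     return best
-- ===== Notes on version B (the rewrite author's own statement) =====
-- stated objective: faster
-- what changed: B replaces A's per-row sorted endpoint sets and per-pair row scans by running per-row min/max bounds plus precomputed range-aggregate tables over the distinct coordinate rows, making each pair check O(1).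
import Mathlib
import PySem

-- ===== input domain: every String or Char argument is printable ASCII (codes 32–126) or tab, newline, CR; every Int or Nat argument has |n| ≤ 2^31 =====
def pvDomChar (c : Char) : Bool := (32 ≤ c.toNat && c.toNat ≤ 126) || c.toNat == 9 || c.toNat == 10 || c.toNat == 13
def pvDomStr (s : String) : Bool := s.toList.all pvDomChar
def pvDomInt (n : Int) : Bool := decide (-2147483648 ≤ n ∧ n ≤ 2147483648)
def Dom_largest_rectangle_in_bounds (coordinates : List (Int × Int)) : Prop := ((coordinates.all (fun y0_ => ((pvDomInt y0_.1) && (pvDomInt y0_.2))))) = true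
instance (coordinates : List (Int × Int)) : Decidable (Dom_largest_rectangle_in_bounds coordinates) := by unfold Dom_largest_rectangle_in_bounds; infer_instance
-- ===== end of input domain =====

-- B replaces A's per-row sorted endpoint sets by running per-row min/max bounds and
-- per-pair O(1) table lookups of range aggregates (objective: faster).

-- ===== PORT A =====
-- The row-keyed dicts (row_intervals here; lo/hi in B) are only ever read back by key
-- lookup — Python's dict iteration order is never observable in either program — so the
-- ports carry them as Std.HashMap (constant-time lookups keep the ports evaluable on wide
-- row ranges); all other dict/set semantics go through PySem as usual.
-- phase 1: row_intervals = defaultdict(set); update over the boundary edges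
def pvAIntervals (coordinates : List (Int × Int)) : Std.HashMap Int (PySem.Set Int) :=
  (PySem.List.pyRange 1 (PySem.List.len coordinates + 1) 1).foldl (fun d i =>
    let p := PySem.List.pyGetD coordinates (PySem.Int.mod (i - 1) (PySem.List.len coordinates)) (0, 0)
    let q := PySem.List.pyGetD coordinates (PySem.Int.mod i (PySem.List.len coordinates)) (0, 0)
    (PySem.List.pyRange (min p.1 q.1) (max p.1 q.1 + 1) 1).foldl (fun d row =>
      d.insert row (PySem.Set.update (d.getD row PySem.Set.empty) [q.2, p.2])) d)
    ∅

-- phase 2: for row in row_intervals: row_intervals[row] = sorted(list(row_intervals[row]))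
-- (in-place value rewrite over the dict's rows, rendered as a value map)
def pvASorted (coordinates : List (Int × Int)) : Std.HashMap Int (List Int) :=
  (pvAIntervals coordinates).toList.foldl
    (fun acc p => acc.insert p.1 (PySem.List.sorted p.2 (fun x => x) false)) ∅

-- phase 3: the pair loop.  `row_intervals[row][0]` / `[-1]`: on a missing row Python's
-- defaultdict would yield an unsubscriptable empty set (TypeError), but every row between
-- two coordinate rows is covered by a boundary edge (the edges form a closed cycle), so
-- that branch is unreachable; the port totalises it with default 0.
def largest_rectangle_in_bounds (coordinates : List (Int × Int)) : Int :=
  let d := pvASorted coordinates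
  let n := PySem.List.len coordinates
  (PySem.List.pyRange 0 n 1).foldl (fun res i =>
    (PySem.List.pyRange (i + 1) n 1).foldl (fun res j =>
      let p := PySem.List.pyGetD coordinates i (0, 0)
      let q := PySem.List.pyGetD coordinates j (0, 0)
      let bottom := min p.1 q.1
      let top := max p.1 q.1
      let left := min p.2 q.2
      let right := max p.2 q.2
      -- row loop with `break` once is_valid is False (state never changes afterwards)
      let valid := (PySem.List.pyRange bottom (top + 1) 1).foldl (fun ok row =>
        if left < PySem.List.pyGetD (d.getD row []) 0 0 ∨
           right > PySem.List.pyGetD (d.getD row []) (-1) 0 then false else ok) true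
      if valid then max res ((top - bottom + 1) * (right - left + 1)) else res) res) 0

-- ===== PORT B =====
-- pass 1: running per-row column bounds lo/hi, one min/max update per covered row
def pvBBounds (coordinates : List (Int × Int)) :
    Std.HashMap Int Int × Std.HashMap Int Int :=
  (PySem.List.pyRange 0 (PySem.List.len coordinates) 1).foldl (fun st k =>
    let p := PySem.List.pyGetD coordinates k (0, 0)
    let q := PySem.List.pyGetD coordinates
      (PySem.Int.mod (k + 1) (PySem.List.len coordinates)) (0, 0)
    let cl := if p.2 < q.2 then p.2 else q.2
    let ch := if p.2 > q.2 then p.2 else q.2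
    (PySem.List.pyRange (min p.1 q.1) (max p.1 q.1 + 1) 1).foldl (fun st row =>
      let lo := st.1
      let hi := st.2
      if lo.contains row then
        (if cl < lo.getD row 0 then lo.insert row cl else lo,
         if ch > hi.getD row 0 then hi.insert row ch else hi)
      else (lo.insert row cl, hi.insert row ch)) st)
    (∅, ∅)

-- pass 2 helpers: as in Source B, on a row no boundary edge covers lo/hi default to 0
-- (such rows never lie inside a checked range; the default mirrors the totalised port of A)
def pvBSeg (lo hi : Std.HashMap Int Int) (rows : List Int) (k2 : Int) :
    List Int × List Int :=
  (PySem.List.pyRange 0 (k2 - 1) 1).foldl (fun sg i =>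
    let ri := PySem.List.pyGetD rows i 0
    let ri1 := PySem.List.pyGetD rows (i + 1) 0
    let mm := (PySem.List.pyRange (ri + 1) (ri1 + 1) 1).foldl (fun mm row =>
      (if lo.getD row 0 > mm.1 then lo.getD row 0 else mm.1,
       if hi.getD row 0 < mm.2 then hi.getD row 0 else mm.2))
      (lo.getD ri 0, hi.getD ri 0)
    (sg.1 ++ [mm.1], sg.2 ++ [mm.2])) ([], [])

def pvBTables (lo hi : Std.HashMap Int Int) (rows : List Int) (k2 : Int)
    (segmax segmin : List Int) : List (List Int) × List (List Int) :=
  (PySem.List.pyRange 0 k2 1).foldl (fun tt a =>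
    let rm := (PySem.List.pyRange (a + 1) k2 1).foldl (fun rm b =>
      (rm.1 ++ [max (PySem.List.pyGetD rm.1 (-1) 0) (PySem.List.pyGetD segmax (b - 1) 0)],
       rm.2 ++ [min (PySem.List.pyGetD rm.2 (-1) 0) (PySem.List.pyGetD segmin (b - 1) 0)]))
      ([lo.getD (PySem.List.pyGetD rows a 0) 0], [hi.getD (PySem.List.pyGetD rows a 0) 0])
    (tt.1 ++ [rm.1], tt.2 ++ [rm.2])) ([], [])

def largest_rectangle_in_bounds_alt (coordinates : List (Int × Int)) : Int :=
  let n := PySem.List.len coordinates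
  if n == 0 then 0 else
  let lohi := pvBBounds coordinates
  let rows := PySem.List.sorted (PySem.Set.ofList (coordinates.map (·.1))) (fun x => x) false
  let k2 := PySem.List.len rows
  let idx := (PySem.List.enumerate rows 0).foldl (fun d p => d.insert p.2 p.1) (PySem.Dict.empty : PySem.Dict Int Int)
  let sg := pvBSeg lohi.1 lohi.2 rows k2
  let tt := pvBTables lohi.1 lohi.2 rows k2 sg.1 sg.2
  (PySem.List.pyRange 0 n 1).foldl (fun best i =>
    (PySem.List.pyRange (i + 1) n 1).foldl (fun best j =>
      let p := PySem.List.pyGetD coordinates i (0, 0)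
      let q := PySem.List.pyGetD coordinates j (0, 0)
      let a0 := idx.getD p.1 0
      let b0 := idx.getD q.1 0
      let a := if a0 > b0 then b0 else a0
      let b := if a0 > b0 then a0 else b0
      let left := if p.2 < q.2 then p.2 else q.2
      let right := if p.2 > q.2 then p.2 else q.2
      if PySem.List.pyGetD (PySem.List.pyGetD tt.1 a []) (b - a) 0 ≤ left ∧
         right ≤ PySem.List.pyGetD (PySem.List.pyGetD tt.2 a []) (b - a) 0 then
        let area := (PySem.List.pyGetD rows b 0 - PySem.List.pyGetD rows a 0 + 1) *
          (right - left + 1)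
        if area > best then area else best
      else best) best) 0

-- ===== PRECONDITION & SPEC =====
def Spec_largest_rectangle_in_bounds (coordinates : List (Int × Int)) (out : Int) : Prop := out = largest_rectangle_in_bounds_alt coordinates
instance (coordinates : List (Int × Int)) (out : Int) : Decidable (Spec_largest_rectangle_in_bounds coordinates out) := by unfold Spec_largest_rectangle_in_bounds; infer_instance

-- ===== CLAIM (what is proved, stated in full; the proofs are below) =====
def Claim_equal_largest_rectangle_in_bounds : Prop := ∀ (coordinates : List (Int × Int)), Dom_largest_rectangle_in_bounds coordinates → Spec_largest_rectangle_in_bounds coordinates (largest_rectangle_in_bounds coordinates)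

-- ===== LEMMAS AND PROOFS =====

-- ---- proof-side abbreviations (used only below the claim block) ----
-- B's per-row bounds as functions
def pvF (c : List (Int × Int)) (row : Int) : Int := (pvBBounds c).1.getD row 0
def pvG (c : List (Int × Int)) (row : Int) : Int := (pvBBounds c).2.getD row 0

-- running max/min of f over the integer interval [x, y]
def pvRmax (f : Int → Int) (x y : Int) : Int :=
  (PySem.List.pyRange (x + 1) (y + 1) 1).foldl (fun a r => max a (f r)) (f x)
def pvRmin (f : Int → Int) (x y : Int) : Int :=
  (PySem.List.pyRange (x + 1) (y + 1) 1).foldl (fun a r => min a (f r)) (f x)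

-- ---- generic fold helpers ----
theorem pv_foldl_max_init (f : Int → Int) (l : List Int) (i j : Int) :
    l.foldl (fun a r => max a (f r)) (max i j) = max i (l.foldl (fun a r => max a (f r)) j) := by
  induction l generalizing j with
  | nil => rfl
  | cons x t ih => simp only [List.foldl_cons, max_assoc]; exact ih (max j (f x))

theorem pv_foldl_min_init (f : Int → Int) (l : List Int) (i j : Int) :
    l.foldl (fun a r => min a (f r)) (min i j) = min i (l.foldl (fun a r => min a (f r)) j) := by
  induction l generalizing j with
  | nil => rfl
  | cons x t ih => simp only [List.foldl_cons, min_assoc]; exact ih (min j (f x))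

theorem pv_foldl_max_le_iff (f : Int → Int) (l : List Int) (i L : Int) :
    l.foldl (fun a r => max a (f r)) i ≤ L ↔ i ≤ L ∧ ∀ r ∈ l, f r ≤ L := by
  induction l generalizing i with
  | nil => simp
  | cons x t ih =>
    simp only [List.foldl_cons, List.mem_cons, ih]
    constructor
    · rintro ⟨h1, h2⟩
      exact ⟨le_trans (le_max_left _ _) h1,
        fun r hr => hr.elim (fun e => e ▸ le_trans (le_max_right _ _) h1) (h2 r)⟩
    · rintro ⟨h1, h2⟩
      exact ⟨max_le h1 (h2 x (Or.inl rfl)), fun r hr => h2 r (Or.inr hr)⟩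

theorem pv_le_foldl_min_iff (f : Int → Int) (l : List Int) (i L : Int) :
    L ≤ l.foldl (fun a r => min a (f r)) i ↔ L ≤ i ∧ ∀ r ∈ l, L ≤ f r := by
  induction l generalizing i with
  | nil => simp
  | cons x t ih =>
    simp only [List.foldl_cons, List.mem_cons, ih]
    constructor
    · rintro ⟨h1, h2⟩
      exact ⟨le_trans h1 (min_le_left _ _),
        fun r hr => hr.elim (fun e => e ▸ le_trans h1 (min_le_right _ _)) (h2 r)⟩
    · rintro ⟨h1, h2⟩
      exact ⟨le_min h1 (h2 x (Or.inl rfl)), fun r hr => h2 r (Or.inr hr)⟩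

theorem pv_pairwise_le_getLast (l : List Int) (h : l.Pairwise (· ≤ ·)) (y : Int)
    (hy : y ∈ l) (hne : l ≠ []) : y ≤ l.getLast hne := by
  rcases List.getElem_of_mem hy with ⟨p, hp, rfl⟩
  rw [List.getLast_eq_getElem]
  rcases eq_or_lt_of_le (Nat.le_pred_of_lt hp) with he | hlt
  · simp [he]
  · exact List.pairwise_iff_getElem.mp h p (l.length - 1) hp (by omega) (by omega)

theorem pv_foldl_inv {β σ₁ σ₂ : Type} (R : σ₁ → σ₂ → Prop) (f : σ₁ → β → σ₁)
    (g : σ₂ → β → σ₂) (l : List β) (a : σ₁) (b : σ₂) (h0 : R a b)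
    (hstep : ∀ x ∈ l, ∀ a b, R a b → R (f a x) (g b x)) :
    R (l.foldl f a) (l.foldl g b) := by
  induction l generalizing a b with
  | nil => exact h0
  | cons x t ih =>
    exact ih (f a x) (g b x) (hstep x (List.mem_cons_self) a b h0)
      (fun y hy => hstep y (List.mem_cons_of_mem _ hy))

theorem pv_hm_get_insert_self {ν : Type} (m : Std.HashMap Int ν) (k : Int) (v : ν) :
    (m.insert k v)[k]? = some v := by simp

theorem pv_hm_get_insert_ne {ν : Type} (m : Std.HashMap Int ν) (k k' : Int) (v : ν)
    (h : k' ≠ k) : (m.insert k v)[k']? = m[k']? := by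
  simp [Std.HashMap.getElem?_insert, Ne.symm h]

theorem pv_hm_fold_get?_not {ν ν' : Type} (f : ν → ν') (l : List (Int × ν))
    (acc : Std.HashMap Int ν') (row : Int) (h : ∀ p ∈ l, p.1 ≠ row) :
    (l.foldl (fun acc p => acc.insert p.1 (f p.2)) acc)[row]? = acc[row]? := by
  induction l generalizing acc with
  | nil => rfl
  | cons p t ih =>
    rw [List.foldl_cons, ih _ (fun q hq => h q (List.mem_cons_of_mem _ hq)),
      pv_hm_get_insert_ne _ _ _ _ (Ne.symm (h p List.mem_cons_self))]

theorem pv_hm_fold_get?_mem {ν ν' : Type} (f : ν → ν') (l : List (Int × ν))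
    (row : Int) (S : ν) :
    l.Pairwise (fun a b => a.1 ≠ b.1) → (row, S) ∈ l → ∀ (acc : Std.HashMap Int ν'),
    (l.foldl (fun acc p => acc.insert p.1 (f p.2)) acc)[row]? = some (f S) := by
  induction l with
  | nil => intro _ hmem _; cases hmem
  | cons p t ih =>
    intro hdist hmem acc
    rcases List.pairwise_cons.mp hdist with ⟨hp, ht⟩
    rcases List.mem_cons.mp hmem with he | hm
    · rw [List.foldl_cons, pv_hm_fold_get?_not _ _ _ _
        (fun q hq => by have := hp q hq; rw [← he] at this; exact Ne.symm this), ← he,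
        pv_hm_get_insert_self]
    · rw [List.foldl_cons]
      exact ih ht hm _

-- ---- phase-1 invariant: A's per-row endpoint set vs B's per-row min/max ----
def pvREL (oS : Option (PySem.Set Int)) (ol oh : Option Int) : Prop :=
  match oS, ol, oh with
  | some S, some l, some h =>
      S.Nodup ∧ l ∈ S ∧ (∀ y ∈ S, l ≤ y) ∧ h ∈ S ∧ (∀ y ∈ S, y ≤ h)
  | none, none, none => True
  | _, _, _ => False

def pvINV (d : Std.HashMap Int (PySem.Set Int))
    (st : Std.HashMap Int Int × Std.HashMap Int Int) : Prop :=
  ∀ row : Int, pvREL d[row]? st.1[row]? st.2[row]?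

theorem pvINV_rowstep (c pc : Int) (row : Int) (d : Std.HashMap Int (PySem.Set Int))
    (st : Std.HashMap Int Int × Std.HashMap Int Int) (h : pvINV d st) :
    pvINV (d.insert row (PySem.Set.update (d.getD row PySem.Set.empty) [c, pc]))
      (let lo := st.1
       let hi := st.2
       let cl := if pc < c then pc else c
       let ch := if pc > c then pc else c
       if lo.contains row then
         (if cl < lo.getD row 0 then lo.insert row cl else lo,
          if ch > hi.getD row 0 then hi.insert row ch else hi)
       else (lo.insert row cl, hi.insert row ch)) := by
  dsimp only
  have hrel := h row
  intro r
  rcases hS : d[row]? with _ | S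
  · have h1 : st.1[row]? = none := by
      revert hrel; unfold pvREL; rw [hS]
      rcases st.1[row]? with _ | _ <;> rcases st.2[row]? with _ | _ <;> simp
    have h2 : st.2[row]? = none := by
      revert hrel; unfold pvREL; rw [hS]
      rcases st.1[row]? with _ | _ <;> rcases st.2[row]? with _ | _ <;> simp
    have hcont : st.1.contains row = false := by
      rw [Std.HashMap.contains_eq_isSome_getElem?, h1]; rfl
    simp only [hcont, Bool.false_eq_true, if_false]
    have hget : d.getD row PySem.Set.empty = PySem.Set.empty := by
      rw [Std.HashMap.getD_eq_getD_getElem?, hS]; rfl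
    by_cases hr : r = row
    · subst hr
      rw [pv_hm_get_insert_self, pv_hm_get_insert_self,
        pv_hm_get_insert_self, hget]
      have hupd : PySem.Set.update PySem.Set.empty [c, pc] = PySem.Set.ofList [c, pc] :=
        PySem.Set.update_nil_left _
      rw [hupd]
      unfold pvREL
      refine ⟨PySem.Set.nodup_ofList _, ?_, ?_, ?_, ?_⟩
      · rw [PySem.Set.mem_ofList]; split_ifs <;> simp
      · intro y hy
        rw [PySem.Set.mem_ofList] at hy
        simp only [List.mem_cons, List.not_mem_nil, or_false] at hy
        rcases hy with rfl | rfl <;> split_ifs <;> omega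
      · rw [PySem.Set.mem_ofList]; split_ifs <;> simp
      · intro y hy
        rw [PySem.Set.mem_ofList] at hy
        simp only [List.mem_cons, List.not_mem_nil, or_false] at hy
        rcases hy with rfl | rfl <;> split_ifs <;> omega
    · rw [pv_hm_get_insert_ne _ _ _ _ hr, pv_hm_get_insert_ne _ _ _ _ hr,
        pv_hm_get_insert_ne _ _ _ _ hr]
      exact h r
  · rcases hl : st.1[row]? with _ | l
    · exfalso; revert hrel; unfold pvREL; rw [hS, hl]
      rcases st.2[row]? with _ | _ <;> simp
    rcases hh : st.2[row]? with _ | hb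
    · exfalso; revert hrel; unfold pvREL; rw [hS, hl, hh]; simp
    unfold pvREL at hrel
    rw [hS, hl, hh] at hrel
    obtain ⟨hnd, hlm, hlb, hhm, hhb⟩ := hrel
    have hcont : st.1.contains row = true := by
      rw [Std.HashMap.contains_eq_isSome_getElem?, hl]; rfl
    simp only [hcont, if_true]
    have hget : d.getD row PySem.Set.empty = S := by
      rw [Std.HashMap.getD_eq_getD_getElem?, hS]; rfl
    have hlo : st.1.getD row 0 = l := by rw [Std.HashMap.getD_eq_getD_getElem?, hl]; rfl
    have hhi : st.2.getD row 0 = hb := by rw [Std.HashMap.getD_eq_getD_getElem?, hh]; rfl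
    rw [hget, hlo, hhi]
    by_cases hr : r = row
    · rw [hr]
      rw [pv_hm_get_insert_self]
      have hmem : ∀ y, y ∈ PySem.Set.update S [c, pc] ↔ y ∈ S ∨ y = c ∨ y = pc := by
        intro y
        rw [PySem.Set.mem_update]
        simp
      have push1 : (if (if pc < c then pc else c) < l then
            st.1.insert row (if pc < c then pc else c) else st.1)[row]?
          = some (if (if pc < c then pc else c) < l then (if pc < c then pc else c) else l) := by
        split_ifs <;> first | exact pv_hm_get_insert_self _ _ _ | exact hl
      have push2 : (if (if pc > c then pc else c) > hb then
            st.2.insert row (if pc > c then pc else c) else st.2)[row]?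
          = some (if (if pc > c then pc else c) > hb then (if pc > c then pc else c) else hb) := by
        split_ifs <;> first | exact pv_hm_get_insert_self _ _ _ | exact hh
      rw [push1, push2]
      have hclmem : (if pc < c then pc else c) = c ∨ (if pc < c then pc else c) = pc := by
        split_ifs <;> simp
      have hclle : (if pc < c then pc else c) ≤ c ∧ (if pc < c then pc else c) ≤ pc := by
        split_ifs <;> omega
      have hchmem : (if pc > c then pc else c) = c ∨ (if pc > c then pc else c) = pc := by
        split_ifs <;> simp
      have hchge : c ≤ (if pc > c then pc else c) ∧ pc ≤ (if pc > c then pc else c) := by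
        split_ifs <;> omega
      generalize hclg : (if pc < c then pc else c) = cl
      generalize hchg : (if pc > c then pc else c) = ch
      rw [hclg] at hclmem hclle
      rw [hchg] at hchmem hchge
      unfold pvREL
      refine ⟨PySem.Set.nodup_update _ _ hnd, ?_, ?_, ?_, ?_⟩
      · rw [hmem]
        split_ifs with hx
        · right
          rcases hclmem with rfl | rfl
          · exact Or.inl rfl
          · exact Or.inr rfl
        · exact Or.inl hlm
      · intro y hy
        rw [hmem] at hy
        rcases hy with hy | rfl | rfl
        · have hls := hlb y hy
          split_ifs with hx <;> omega
        · split_ifs with hx <;> omega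
        · split_ifs with hx <;> omega
      · rw [hmem]
        split_ifs with hx
        · right
          rcases hchmem with rfl | rfl
          · exact Or.inl rfl
          · exact Or.inr rfl
        · exact Or.inl hhm
      · intro y hy
        rw [hmem] at hy
        rcases hy with hy | rfl | rfl
        · have hhs := hhb y hy
          split_ifs with hx <;> omega
        · split_ifs with hx <;> omega
        · split_ifs with hx <;> omega
    · rw [pv_hm_get_insert_ne _ _ _ _ hr]
      split_ifs <;> (try simp only [pv_hm_get_insert_ne _ _ _ _ hr]) <;> exact h r

set_option maxHeartbeats 1000000 in
theorem pvINV_final (coordinates : List (Int × Int)) :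
    pvINV (pvAIntervals coordinates) (pvBBounds coordinates) := by
  unfold pvAIntervals pvBBounds
  rw [PySem.List.pyRange_one 1 (PySem.List.len coordinates + 1),
    PySem.List.pyRange_one 0 (PySem.List.len coordinates)]
  simp only [add_sub_cancel_right, sub_zero, List.foldl_map]
  refine pv_foldl_inv pvINV _ _ _ _ _ ?_ ?_
  · intro row
    unfold pvREL
    simp
  · intro k hk d st hinv
    have hkn : (k : Int) < PySem.List.len coordinates := by
      simp only [PySem.List.len_eq]
      exact_mod_cast List.mem_range.mp hk
    have hnpos : (0 : Int) < PySem.List.len coordinates := by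
      have := Int.natCast_nonneg k; omega
    have hmod : ∀ (j : Int), 0 ≤ j → j < PySem.List.len coordinates →
        PySem.Int.mod j (PySem.List.len coordinates) = j := by
      intro j h0 h1
      rw [PySem.Int.mod_eq_emod_of_pos hnpos]
      exact Int.emod_eq_of_lt h0 h1
    have e1 : (1 : Int) + (k : Int) - 1 = (k : Int) := by ring
    have e2 : (0 : Int) + (k : Int) = (k : Int) := by ring
    have e3 : PySem.Int.mod ((k : Int)) (PySem.List.len coordinates) = (k : Int) :=
      hmod _ (Int.natCast_nonneg k) hkn
    have e4 : (1 : Int) + (k : Int) = (k : Int) + 1 := by ring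
    simp only [e2, e4]
    simp only [Int.add_sub_cancel]
    simp only [e3]
    refine pv_foldl_inv pvINV _ _ _ _ _ hinv ?_
    intro row _ d' st' h'
    exact pvINV_rowstep _ _ row d' st' h'
-- the link: A's sorted endpoint list reads off B's bounds
theorem pvLink (c : List (Int × Int)) (row : Int) :
    PySem.List.pyGetD ((pvASorted c).getD row []) 0 0 = pvF c row ∧
    PySem.List.pyGetD ((pvASorted c).getD row []) (-1) 0 = pvG c row := by
  have hrel := pvINV_final c row
  unfold pvF pvG
  have hdist : (pvAIntervals c).toList.Pairwise (fun a b => a.1 ≠ b.1) := by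
    have h := Std.HashMap.distinct_keys_toList (m := pvAIntervals c)
    exact h.imp (fun hx => by simpa using hx)
  have hmap : (pvASorted c)[row]? = ((pvAIntervals c)[row]?).map
      (fun S => PySem.List.sorted S (fun x => x) false) := by
    unfold pvASorted
    rcases hS : (pvAIntervals c)[row]? with _ | S
    · rw [pv_hm_fold_get?_not (fun S => PySem.List.sorted S (fun x => x) false) _ _ _ ?_]
      · simp
      · intro p hp hne
        have hm := Std.HashMap.mem_toList_iff_getElem?_eq_some.mp
          (show (p.1, p.2) ∈ (pvAIntervals c).toList from hp)
        rw [hne, hS] at hm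
        cases hm
    · rw [pv_hm_fold_get?_mem (fun S => PySem.List.sorted S (fun x => x) false) _ _ S hdist
        (Std.HashMap.mem_toList_iff_getElem?_eq_some.mpr hS) _]
      rfl
  rcases hS : (pvAIntervals c)[row]? with _ | S
  · have h1 : (pvBBounds c).1[row]? = none := by
      revert hrel; unfold pvREL; rw [hS]
      rcases (pvBBounds c).1[row]? with _ | _ <;>
        rcases (pvBBounds c).2[row]? with _ | _ <;> simp
    have h2 : (pvBBounds c).2[row]? = none := by
      revert hrel; unfold pvREL; rw [hS]
      rcases (pvBBounds c).1[row]? with _ | _ <;>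
        rcases (pvBBounds c).2[row]? with _ | _ <;> simp
    rw [hS] at hmap
    rw [Std.HashMap.getD_eq_getD_getElem?, hmap, Std.HashMap.getD_eq_getD_getElem?, h1,
      Std.HashMap.getD_eq_getD_getElem?, h2]
    constructor <;> rfl
  · rcases hl : (pvBBounds c).1[row]? with _ | l
    · exfalso; revert hrel; unfold pvREL; rw [hS, hl]
      rcases (pvBBounds c).2[row]? with _ | _ <;> simp
    rcases hh : (pvBBounds c).2[row]? with _ | hb
    · exfalso; revert hrel; unfold pvREL; rw [hS, hl, hh]; simp
    unfold pvREL at hrel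
    rw [hS, hl, hh] at hrel
    obtain ⟨hnd, hlm, hlb, hhm, hhb⟩ := hrel
    rw [hS] at hmap
    rw [Std.HashMap.getD_eq_getD_getElem?, hmap, Std.HashMap.getD_eq_getD_getElem?, hl,
      Std.HashMap.getD_eq_getD_getElem?, hh]
    simp only [Option.map_some, Option.getD_some]
    have hSne : S ≠ [] := by rintro rfl; cases hlm
    have hsne : PySem.List.sorted S (fun x => x) false ≠ [] := by
      rw [Ne, PySem.List.sorted_eq_nil_iff]; exact hSne
    rcases hlst : PySem.List.sorted S (fun x => x) false with _ | ⟨m, t⟩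
    · exact absurd hlst hsne
    constructor
    · rw [PySem.List.pyGetD_zero_cons]
      have hm1 : m ≤ l := PySem.List.key_head_sorted_le S (fun x => x) hlst l hlm
      have hm2 : l ≤ m := hlb m (by
        have : m ∈ PySem.List.sorted S (fun x => x) false := by rw [hlst]; simp
        rwa [PySem.List.mem_sorted] at this)
      omega
    · rw [← hlst, PySem.List.pyGetD_neg_one _ _ (by rw [hlst]; simp)]
      have hpw : (PySem.List.sorted S (fun x => x) false).Pairwise (· ≤ ·) :=
        PySem.List.sorted_pairwise S (fun x => x)
      have hup : (PySem.List.sorted S (fun x => x) false).getLast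
          (by rw [hlst]; simp) ≤ hb := hhb _ (by
        have := List.getLast_mem (l := PySem.List.sorted S (fun x => x) false)
          (by rw [hlst]; simp)
        rwa [PySem.List.mem_sorted] at this)
      have hdn : hb ≤ (PySem.List.sorted S (fun x => x) false).getLast
          (by rw [hlst]; simp) :=
        pv_pairwise_le_getLast _ hpw hb (by rw [PySem.List.mem_sorted]; exact hhm) _
      omega

-- ---- range-aggregate machinery for B's tables ----
theorem pv_le_pvRmax_self (f : Int → Int) (x y : Int) (h1 : x ≤ y) :
    f y ≤ pvRmax f x y := by
  rcases eq_or_lt_of_le h1 with rfl | hlt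
  · unfold pvRmax; rw [PySem.List.pyRange_one_eq_nil (le_refl _)]; simp
  · exact (PySem.List.le_foldl_max_int _ f (f x)).2 y
      (by rw [PySem.List.mem_pyRange_one]; omega)

theorem pv_pvRmin_le_self (f : Int → Int) (x y : Int) (h1 : x ≤ y) :
    pvRmin f x y ≤ f y := by
  rcases eq_or_lt_of_le h1 with rfl | hlt
  · unfold pvRmin; rw [PySem.List.pyRange_one_eq_nil (le_refl _)]; simp
  · exact ((pv_le_foldl_min_iff f _ (f x) _).mp (le_refl _)).2 y
      (by rw [PySem.List.mem_pyRange_one]; omega)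

theorem pvRmax_merge (f : Int → Int) (x y z : Int) (h1 : x ≤ y) (h2 : y ≤ z) :
    max (pvRmax f x y) (pvRmax f y z) = pvRmax f x z := by
  unfold pvRmax
  rw [PySem.List.pyRange_one_append (x + 1) (y + 1) (z + 1) (by omega) (by omega),
    List.foldl_append]
  have hy : (PySem.List.pyRange (x + 1) (y + 1) 1).foldl (fun a r => max a (f r)) (f x) =
      max ((PySem.List.pyRange (x + 1) (y + 1) 1).foldl (fun a r => max a (f r)) (f x)) (f y) :=
    (max_eq_left (pv_le_pvRmax_self f x y h1)).symm
  conv_rhs => rw [hy]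
  rw [pv_foldl_max_init]

theorem pvRmin_merge (f : Int → Int) (x y z : Int) (h1 : x ≤ y) (h2 : y ≤ z) :
    min (pvRmin f x y) (pvRmin f y z) = pvRmin f x z := by
  unfold pvRmin
  rw [PySem.List.pyRange_one_append (x + 1) (y + 1) (z + 1) (by omega) (by omega),
    List.foldl_append]
  have hy : (PySem.List.pyRange (x + 1) (y + 1) 1).foldl (fun a r => min a (f r)) (f x) =
      min ((PySem.List.pyRange (x + 1) (y + 1) 1).foldl (fun a r => min a (f r)) (f x)) (f y) :=
    (min_eq_left (pv_pvRmin_le_self f x y h1)).symm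
  conv_rhs => rw [hy]
  rw [pv_foldl_min_init]

theorem pvRmax_le_iff (f : Int → Int) (x y L : Int) (hxy : x ≤ y) :
    pvRmax f x y ≤ L ↔ ∀ r ∈ PySem.List.pyRange x (y + 1) 1, f r ≤ L := by
  rw [PySem.List.pyRange_one_cons (by omega : x < y + 1)]
  unfold pvRmax
  rw [pv_foldl_max_le_iff]
  simp only [List.mem_cons]
  constructor
  · rintro ⟨h1, h2⟩ r hr
    rcases hr with rfl | hr
    · exact h1
    · exact h2 r hr
  · intro h
    exact ⟨h x (Or.inl rfl), fun r hr => h r (Or.inr hr)⟩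

theorem pv_le_pvRmin_iff (f : Int → Int) (x y L : Int) (hxy : x ≤ y) :
    L ≤ pvRmin f x y ↔ ∀ r ∈ PySem.List.pyRange x (y + 1) 1, L ≤ f r := by
  rw [PySem.List.pyRange_one_cons (by omega : x < y + 1)]
  unfold pvRmin
  rw [pv_le_foldl_min_iff]
  simp only [List.mem_cons]
  constructor
  · rintro ⟨h1, h2⟩ r hr
    rcases hr with rfl | hr
    · exact h1
    · exact h2 r hr
  · intro h
    exact ⟨h x (Or.inl rfl), fun r hr => h r (Or.inr hr)⟩

theorem pvSeg_eq (lo hi : Std.HashMap Int Int) (rows : List Int) (k2 : Int) :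
    pvBSeg lo hi rows k2 =
      ((PySem.List.pyRange 0 (k2 - 1) 1).map (fun i =>
          pvRmax (fun r => lo.getD r 0) (PySem.List.pyGetD rows i 0)
            (PySem.List.pyGetD rows (i + 1) 0)),
       (PySem.List.pyRange 0 (k2 - 1) 1).map (fun i =>
          pvRmin (fun r => hi.getD r 0) (PySem.List.pyGetD rows i 0)
            (PySem.List.pyGetD rows (i + 1) 0))) := by
  unfold pvBSeg
  rw [PySem.List.foldl_congr_mem _ _
    (fun sg i => (sg.1 ++ [pvRmax (fun r => lo.getD r 0) (PySem.List.pyGetD rows i 0)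
        (PySem.List.pyGetD rows (i + 1) 0)],
      sg.2 ++ [pvRmin (fun r => hi.getD r 0) (PySem.List.pyGetD rows i 0)
        (PySem.List.pyGetD rows (i + 1) 0)])) _ ?_]
  · rw [PySem.List.foldl_prod_mk
      (f := fun s i => s ++ [pvRmax (fun r => lo.getD r 0) (PySem.List.pyGetD rows i 0)
        (PySem.List.pyGetD rows (i + 1) 0)])
      (g := fun s i => s ++ [pvRmin (fun r => hi.getD r 0) (PySem.List.pyGetD rows i 0)
        (PySem.List.pyGetD rows (i + 1) 0)])]
    rw [PySem.List.foldl_append_singleton_eq_map, PySem.List.foldl_append_singleton_eq_map]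
    simp
  · intro sg i _
    have hin : (PySem.List.pyRange (PySem.List.pyGetD rows i 0 + 1)
          (PySem.List.pyGetD rows (i + 1) 0 + 1) 1).foldl
        (fun mm row => (if lo.getD row 0 > mm.1 then lo.getD row 0 else mm.1,
          if hi.getD row 0 < mm.2 then hi.getD row 0 else mm.2))
        (lo.getD (PySem.List.pyGetD rows i 0) 0, hi.getD (PySem.List.pyGetD rows i 0) 0)
      = (pvRmax (fun r => lo.getD r 0) (PySem.List.pyGetD rows i 0)
          (PySem.List.pyGetD rows (i + 1) 0),
         pvRmin (fun r => hi.getD r 0) (PySem.List.pyGetD rows i 0)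
          (PySem.List.pyGetD rows (i + 1) 0)) := by
      rw [PySem.List.foldl_congr_mem _ _
        (fun mm row => (max mm.1 (lo.getD row 0), min mm.2 (hi.getD row 0))) _ ?_]
      · rw [PySem.List.foldl_prod_mk (f := fun a row => max a (lo.getD row 0))
          (g := fun a row => min a (hi.getD row 0))]
        rfl
      · intro mm row _
        have h1 : (if lo.getD row 0 > mm.1 then lo.getD row 0 else mm.1) =
            max mm.1 (lo.getD row 0) := by rw [max_def]; split_ifs <;> omega
        have h2 : (if hi.getD row 0 < mm.2 then hi.getD row 0 else mm.2) =
            min mm.2 (hi.getD row 0) := by rw [min_def]; split_ifs <;> omega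
        rw [h1, h2]
    simp only [hin]

theorem pvRmax_self (f : Int → Int) (x : Int) : pvRmax f x x = f x := by
  unfold pvRmax; rw [PySem.List.pyRange_one_eq_nil (le_refl _)]; rfl

theorem pvRmin_self (f : Int → Int) (x : Int) : pvRmin f x x = f x := by
  unfold pvRmin; rw [PySem.List.pyRange_one_eq_nil (le_refl _)]; rfl

theorem pv_rows_mono (rows : List Int) (hmono : rows.Pairwise (· < ·)) (i j : Int)
    (h0 : 0 ≤ i) (hij : i ≤ j) (hj : j < (rows.length : Int)) :
    PySem.List.pyGetD rows i 0 ≤ PySem.List.pyGetD rows j 0 := by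
  rw [PySem.List.pyGetD_eq_getElem _ _ h0 (by simpa using lt_of_le_of_lt hij hj),
    PySem.List.pyGetD_eq_getElem _ _ (le_trans h0 hij) (by simpa using hj)]
  rcases eq_or_lt_of_le hij with rfl | hlt
  · exact le_refl _
  · exact le_of_lt (List.pairwise_iff_getElem.mp hmono i.toNat j.toNat
      (by omega) (by omega) (by omega))

set_option maxHeartbeats 1000000 in
theorem pvTables_eq (lo hi : Std.HashMap Int Int) (rows : List Int)
    (hmono : rows.Pairwise (· < ·)) :
    pvBTables lo hi rows (PySem.List.len rows)
        (pvBSeg lo hi rows (PySem.List.len rows)).1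
        (pvBSeg lo hi rows (PySem.List.len rows)).2 =
      ((PySem.List.pyRange 0 (PySem.List.len rows) 1).map (fun a =>
          (PySem.List.pyRange a (PySem.List.len rows) 1).map (fun b =>
            pvRmax (fun r => lo.getD r 0) (PySem.List.pyGetD rows a 0)
              (PySem.List.pyGetD rows b 0))),
       (PySem.List.pyRange 0 (PySem.List.len rows) 1).map (fun a =>
          (PySem.List.pyRange a (PySem.List.len rows) 1).map (fun b =>
            pvRmin (fun r => hi.getD r 0) (PySem.List.pyGetD rows a 0)
              (PySem.List.pyGetD rows b 0)))) := by
  rw [pvSeg_eq]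
  unfold pvBTables
  rw [PySem.List.foldl_congr_mem _ _
    (fun tt a => (tt.1 ++ [(PySem.List.pyRange a (PySem.List.len rows) 1).map (fun b =>
        pvRmax (fun r => lo.getD r 0) (PySem.List.pyGetD rows a 0)
          (PySem.List.pyGetD rows b 0))],
      tt.2 ++ [(PySem.List.pyRange a (PySem.List.len rows) 1).map (fun b =>
        pvRmin (fun r => hi.getD r 0) (PySem.List.pyGetD rows a 0)
          (PySem.List.pyGetD rows b 0))])) _ ?_]
  · rw [PySem.List.foldl_prod_mk
      (f := fun s a => s ++ [(PySem.List.pyRange a (PySem.List.len rows) 1).map (fun b =>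
        pvRmax (fun r => lo.getD r 0) (PySem.List.pyGetD rows a 0)
          (PySem.List.pyGetD rows b 0))])
      (g := fun s a => s ++ [(PySem.List.pyRange a (PySem.List.len rows) 1).map (fun b =>
        pvRmin (fun r => hi.getD r 0) (PySem.List.pyGetD rows a 0)
          (PySem.List.pyGetD rows b 0))])]
    rw [PySem.List.foldl_append_singleton_eq_map, PySem.List.foldl_append_singleton_eq_map]
    simp
  · intro tt a ha
    rw [PySem.List.mem_pyRange_one] at ha
    have hbuild : ∀ m : Nat, a + 1 + (m : Int) ≤ PySem.List.len rows →
        (PySem.List.pyRange (a + 1) (a + 1 + (m : Int)) 1).foldl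
          (fun rm b =>
            (rm.1 ++ [max (PySem.List.pyGetD rm.1 (-1) 0)
              (PySem.List.pyGetD ((PySem.List.pyRange 0 (PySem.List.len rows - 1) 1).map
                (fun i => pvRmax (fun r => lo.getD r 0) (PySem.List.pyGetD rows i 0)
                  (PySem.List.pyGetD rows (i + 1) 0))) (b - 1) 0)],
             rm.2 ++ [min (PySem.List.pyGetD rm.2 (-1) 0)
              (PySem.List.pyGetD ((PySem.List.pyRange 0 (PySem.List.len rows - 1) 1).map
                (fun i => pvRmin (fun r => hi.getD r 0) (PySem.List.pyGetD rows i 0)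
                  (PySem.List.pyGetD rows (i + 1) 0))) (b - 1) 0)]))
          ([lo.getD (PySem.List.pyGetD rows a 0) 0], [hi.getD (PySem.List.pyGetD rows a 0) 0])
        = ((PySem.List.pyRange a (a + 1 + (m : Int)) 1).map (fun b =>
            pvRmax (fun r => lo.getD r 0) (PySem.List.pyGetD rows a 0)
              (PySem.List.pyGetD rows b 0)),
           (PySem.List.pyRange a (a + 1 + (m : Int)) 1).map (fun b =>
            pvRmin (fun r => hi.getD r 0) (PySem.List.pyGetD rows a 0)
              (PySem.List.pyGetD rows b 0))) := by
      intro m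
      induction m with
      | zero =>
        intro _
        norm_num
        exact ⟨by rw [pvRmax_self], by rw [pvRmin_self]⟩
      | succ m ih =>
        intro hm
        have hcast : a + 1 + ((m + 1 : Nat) : Int) = (a + 1 + (m : Int)) + 1 := by push_cast; ring
        rw [hcast]
        have hm' : a + 1 + (m : Int) ≤ PySem.List.len rows := by
          rw [hcast] at hm; omega
        rw [PySem.List.pyRange_one_succ_right (by omega : a + 1 ≤ a + 1 + (m : Int)),
          List.foldl_append, ih hm']
        simp only [List.foldl_cons, List.foldl_nil]
        have hsplit : PySem.List.pyRange a (a + 1 + (m : Int)) 1 =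
            PySem.List.pyRange a (a + (m : Int)) 1 ++ [a + (m : Int)] := by
          have : a + 1 + (m : Int) = (a + (m : Int)) + 1 := by ring
          rw [this, PySem.List.pyRange_one_succ_right (by omega : a ≤ a + (m : Int))]
        have hlast1 : PySem.List.pyGetD ((PySem.List.pyRange a (a + 1 + (m : Int)) 1).map
            (fun b => pvRmax (fun r => lo.getD r 0) (PySem.List.pyGetD rows a 0)
              (PySem.List.pyGetD rows b 0))) (-1) 0 =
            pvRmax (fun r => lo.getD r 0) (PySem.List.pyGetD rows a 0)
              (PySem.List.pyGetD rows (a + (m : Int)) 0) := by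
          rw [hsplit, List.map_append]
          exact PySem.List.pyGetD_neg_one_append_singleton _ _ _
        have hlast2 : PySem.List.pyGetD ((PySem.List.pyRange a (a + 1 + (m : Int)) 1).map
            (fun b => pvRmin (fun r => hi.getD r 0) (PySem.List.pyGetD rows a 0)
              (PySem.List.pyGetD rows b 0))) (-1) 0 =
            pvRmin (fun r => hi.getD r 0) (PySem.List.pyGetD rows a 0)
              (PySem.List.pyGetD rows (a + (m : Int)) 0) := by
          rw [hsplit, List.map_append]
          exact PySem.List.pyGetD_neg_one_append_singleton _ _ _
        have hseg1 : PySem.List.pyGetD ((PySem.List.pyRange 0 (PySem.List.len rows - 1) 1).map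
            (fun i => pvRmax (fun r => lo.getD r 0) (PySem.List.pyGetD rows i 0)
              (PySem.List.pyGetD rows (i + 1) 0))) (a + 1 + (m : Int) - 1) 0 =
            pvRmax (fun r => lo.getD r 0) (PySem.List.pyGetD rows (a + (m : Int)) 0)
              (PySem.List.pyGetD rows (a + (m : Int) + 1) 0) := by
          have he : a + 1 + (m : Int) - 1 = a + (m : Int) := by ring
          rw [he, PySem.List.pyGetD_map_pyRange_of_nonneg _ _ _ _ (by omega) (by omega)]
        have hseg2 : PySem.List.pyGetD ((PySem.List.pyRange 0 (PySem.List.len rows - 1) 1).map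
            (fun i => pvRmin (fun r => hi.getD r 0) (PySem.List.pyGetD rows i 0)
              (PySem.List.pyGetD rows (i + 1) 0))) (a + 1 + (m : Int) - 1) 0 =
            pvRmin (fun r => hi.getD r 0) (PySem.List.pyGetD rows (a + (m : Int)) 0)
              (PySem.List.pyGetD rows (a + (m : Int) + 1) 0) := by
          have he : a + 1 + (m : Int) - 1 = a + (m : Int) := by ring
          rw [he, PySem.List.pyGetD_map_pyRange_of_nonneg _ _ _ _ (by omega) (by omega)]
        rw [hlast1, hlast2, hseg1, hseg2,
          pvRmax_merge _ _ _ _ (pv_rows_mono rows hmono a (a + (m : Int)) (by omega) (by omega)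
            (by simp only [PySem.List.len_eq] at hm' ⊢; omega))
            (pv_rows_mono rows hmono (a + (m : Int)) (a + (m : Int) + 1) (by omega) (by omega)
            (by simp only [PySem.List.len_eq] at hm ⊢; rw [hcast] at hm; omega)),
          pvRmin_merge _ _ _ _ (pv_rows_mono rows hmono a (a + (m : Int)) (by omega) (by omega)
            (by simp only [PySem.List.len_eq] at hm' ⊢; omega))
            (pv_rows_mono rows hmono (a + (m : Int)) (a + (m : Int) + 1) (by omega) (by omega)
            (by simp only [PySem.List.len_eq] at hm ⊢; rw [hcast] at hm; omega))]
        rw [PySem.List.pyRange_one_succ_right (by omega : a ≤ a + 1 + (m : Int)),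
          List.map_append, List.map_append]
        have he2 : a + (m : Int) + 1 = a + 1 + (m : Int) := by ring
        rw [he2]
        simp
    have hfin := hbuild (PySem.List.len rows - (a + 1)).toNat
      (by simp only [PySem.List.len_eq] at ha ⊢; omega)
    have hcast2 : a + 1 + ((PySem.List.len rows - (a + 1)).toNat : Int) =
        PySem.List.len rows := by
      simp only [PySem.List.len_eq] at ha ⊢
      omega
    rw [hcast2] at hfin
    rw [hfin]

theorem pvIdx_getD (rows : List Int) (hnd : rows.Nodup) (k : Nat) (hk : k < rows.length) :
    ((PySem.List.enumerate rows 0).foldl (fun d p => d.insert p.2 p.1)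
        (PySem.Dict.empty : PySem.Dict Int Int)).getD rows[k] 0 = (k : Int) := by
  have hitems := PySem.Dict.items_foldl_insert_fresh (PySem.List.enumerate rows 0)
    (fun p => p.2) (fun p => p.1) (PySem.Dict.empty : PySem.Dict Int Int)
    (by intro a _; rfl)
    (by rw [PySem.List.map_snd_enumerate]; exact hnd)
  set d := (PySem.List.enumerate rows 0).foldl (fun d p => d.insert p.2 p.1)
    (PySem.Dict.empty : PySem.Dict Int Int) with hd
  have hdi : d.items = (PySem.List.enumerate rows 0).map (fun p => (p.2, p.1)) := by
    rw [hd] at hitems ⊢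
    simpa using hitems
  have hkeys : d.keys.Nodup := by
    have : d.keys = rows := by
      show d.items.map (·.1) = rows
      rw [hdi, List.map_map]
      have : ((fun p : Int × Int => p.1) ∘ fun p : Int × Int => (p.2, p.1)) =
          (fun p : Int × Int => p.2) := rfl
      rw [this, PySem.List.map_snd_enumerate]
    rw [this]; exact hnd
  have hmem : ((rows[k] : Int), (k : Int)) ∈ d.items := by
    rw [hdi, PySem.List.enumerate_eq_map_pyRange rows 0, List.map_map]
    refine List.mem_map.mpr ⟨(k : Int), ?_, ?_⟩
    · rw [PySem.List.mem_pyRange_one]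
      constructor
      · omega
      · simp only [PySem.List.len_eq]; exact_mod_cast hk
    · simp [PySem.List.pyGetD_natCast, List.getD_eq_getElem?_getD, hk]
  exact PySem.Dict.getD_of_mem_items d hmem hkeys 0

-- assembly helpers
theorem pv_nat_getElem_mono (rows : List Int) (hpw : rows.Pairwise (· < ·))
    (u v : Nat) (hu : u < rows.length) (hv : v < rows.length) (huv : u ≤ v) :
    rows[u] ≤ rows[v] := by
  rcases eq_or_lt_of_le huv with rfl | h
  · exact le_refl _
  · exact le_of_lt (List.pairwise_iff_getElem.mp hpw u v hu hv h)

-- ===== VERDICT (by name: the statement is the Claim_ definition above) =====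
set_option maxHeartbeats 4000000 in
theorem largest_rectangle_in_bounds_spec : Claim_equal_largest_rectangle_in_bounds := by
  intro coordinates _
  unfold Spec_largest_rectangle_in_bounds
  by_cases hnil : coordinates = []
  · subst hnil; rfl
  have hlen : 0 < coordinates.length := List.length_pos_iff.mpr hnil
  simp only [largest_rectangle_in_bounds, largest_rectangle_in_bounds_alt]
  have hne : (PySem.List.len coordinates == 0) = false := by
    simp only [PySem.List.len_eq, beq_eq_false_iff_ne, Ne]
    omega
  rw [hne]
  simp only [Bool.false_eq_true, if_false]
  -- shared data for B's side
  have hrowsperm := PySem.List.sorted_perm (PySem.Set.ofList (coordinates.map (·.1)))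
    (fun x => x) false
  have hrownd : (PySem.List.sorted (PySem.Set.ofList (coordinates.map (·.1)))
      (fun x => x) false).Nodup :=
    hrowsperm.nodup_iff.mpr (PySem.Set.nodup_ofList _)
  have hpw := PySem.List.sorted_ofList_pairwise_lt (coordinates.map (·.1))
  rw [pvTables_eq _ _ _ hpw]
  apply PySem.List.foldl_congr_mem
  intro res i hi
  apply PySem.List.foldl_congr_mem
  intro res' j hj
  rw [PySem.List.mem_pyRange_one] at hi hj
  dsimp only
  -- the two endpoints of the pair
  set p := PySem.List.pyGetD coordinates i (0, 0) with hpdef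
  set q := PySem.List.pyGetD coordinates j (0, 0) with hqdef
  have hpmem : p ∈ coordinates := PySem.List.pyGetD_mem _ _ (by
    simp only [PySem.List.len_eq] at hi
    unfold PySem.Raise.InRange
    constructor <;> omega)
  have hqmem : q ∈ coordinates := PySem.List.pyGetD_mem _ _ (by
    simp only [PySem.List.len_eq] at hi hj
    unfold PySem.Raise.InRange
    constructor <;> omega)
  have hp1 : p.1 ∈ PySem.List.sorted (PySem.Set.ofList (coordinates.map (·.1)))
      (fun x => x) false := by
    rw [PySem.List.mem_sorted, PySem.Set.mem_ofList]
    exact List.mem_map_of_mem hpmem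
  have hq1 : q.1 ∈ PySem.List.sorted (PySem.Set.ofList (coordinates.map (·.1)))
      (fun x => x) false := by
    rw [PySem.List.mem_sorted, PySem.Set.mem_ofList]
    exact List.mem_map_of_mem hqmem
  set rows := PySem.List.sorted (PySem.Set.ofList (coordinates.map (·.1)))
    (fun x => x) false with hrowsdef
  obtain ⟨a0, ha0lt, ha0⟩ := List.getElem_of_mem hp1
  obtain ⟨b0, hb0lt, hb0⟩ := List.getElem_of_mem hq1
  have hidxa : ((PySem.List.enumerate rows 0).foldl (fun d p => d.insert p.2 p.1)
      (PySem.Dict.empty : PySem.Dict Int Int)).getD p.1 0 = (a0 : Int) := by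
    rw [← ha0]; exact pvIdx_getD rows hrownd a0 ha0lt
  have hidxb : ((PySem.List.enumerate rows 0).foldl (fun d p => d.insert p.2 p.1)
      (PySem.Dict.empty : PySem.Dict Int Int)).getD q.1 0 = (b0 : Int) := by
    rw [← hb0]; exact pvIdx_getD rows hrownd b0 hb0lt
  rw [hidxa, hidxb]
  have hsela : (if (a0 : Int) > (b0 : Int) then (b0 : Int) else (a0 : Int)) =
      ((min a0 b0 : Nat) : Int) := by split_ifs <;> push_cast <;> omega
  have hselb : (if (a0 : Int) > (b0 : Int) then (a0 : Int) else (b0 : Int)) =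
      ((max a0 b0 : Nat) : Int) := by split_ifs <;> push_cast <;> omega
  rw [hsela, hselb]
  have hA0lt : min a0 b0 < rows.length := lt_of_le_of_lt (min_le_left _ _) ha0lt
  have hB0lt : max a0 b0 < rows.length := by
    rcases max_choice a0 b0 with h | h <;> rw [h] <;> assumption
  have hido : ∀ (u : Nat) (hu : u < rows.length),
      PySem.List.pyGetD rows (u : Int) 0 = rows[u] := by
    intro u hu
    rw [PySem.List.pyGetD_natCast, List.getD_eq_getElem?_getD,
      List.getElem?_eq_getElem hu, Option.getD_some]
  have hmle : p.1 ≤ q.1 → a0 ≤ b0 ∨ rows[a0] = rows[b0] := by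
    intro _
    rcases le_total a0 b0 with h | h
    · exact Or.inl h
    · have := pv_nat_getElem_mono rows hpw b0 a0 hb0lt ha0lt h
      rw [ha0, hb0] at this
      right; rw [ha0, hb0]; omega
  have hgetA : PySem.List.pyGetD rows ((min a0 b0 : Nat) : Int) 0 = min p.1 q.1 := by
    rcases le_total a0 b0 with h | h
    · rw [min_eq_left h, hido a0 ha0lt, ha0]
      have := pv_nat_getElem_mono rows hpw a0 b0 ha0lt hb0lt h
      rw [ha0, hb0] at this
      omega
    · rw [min_eq_right h, hido b0 hb0lt, hb0]
      have := pv_nat_getElem_mono rows hpw b0 a0 hb0lt ha0lt h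
      rw [ha0, hb0] at this
      omega
  have hgetB : PySem.List.pyGetD rows ((max a0 b0 : Nat) : Int) 0 = max p.1 q.1 := by
    rcases le_total a0 b0 with h | h
    · rw [max_eq_right h, hido b0 hb0lt, hb0]
      have := pv_nat_getElem_mono rows hpw a0 b0 ha0lt hb0lt h
      rw [ha0, hb0] at this
      omega
    · rw [max_eq_left h, hido a0 ha0lt, ha0]
      have := pv_nat_getElem_mono rows hpw b0 a0 hb0lt ha0lt h
      rw [ha0, hb0] at this
      omega
  -- table lookups
  have hlook1 : PySem.List.pyGetD ((PySem.List.pyRange 0 (PySem.List.len rows) 1).map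
      (fun a => (PySem.List.pyRange a (PySem.List.len rows) 1).map (fun b =>
        pvRmax (fun r => (pvBBounds coordinates).1.getD r 0) (PySem.List.pyGetD rows a 0)
          (PySem.List.pyGetD rows b 0)))) ((min a0 b0 : Nat) : Int) [] =
      (PySem.List.pyRange ((min a0 b0 : Nat) : Int) (PySem.List.len rows) 1).map (fun b =>
        pvRmax (fun r => (pvBBounds coordinates).1.getD r 0)
          (PySem.List.pyGetD rows ((min a0 b0 : Nat) : Int) 0) (PySem.List.pyGetD rows b 0)) :=
    PySem.List.pyGetD_map_pyRange_of_nonneg _ _ _ _ (by omega)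
      (by simp only [PySem.List.len_eq]; exact_mod_cast hA0lt)
  have hlook2 : PySem.List.pyGetD ((PySem.List.pyRange 0 (PySem.List.len rows) 1).map
      (fun a => (PySem.List.pyRange a (PySem.List.len rows) 1).map (fun b =>
        pvRmin (fun r => (pvBBounds coordinates).2.getD r 0) (PySem.List.pyGetD rows a 0)
          (PySem.List.pyGetD rows b 0)))) ((min a0 b0 : Nat) : Int) [] =
      (PySem.List.pyRange ((min a0 b0 : Nat) : Int) (PySem.List.len rows) 1).map (fun b =>
        pvRmin (fun r => (pvBBounds coordinates).2.getD r 0)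
          (PySem.List.pyGetD rows ((min a0 b0 : Nat) : Int) 0) (PySem.List.pyGetD rows b 0)) :=
    PySem.List.pyGetD_map_pyRange_of_nonneg _ _ _ _ (by omega)
      (by simp only [PySem.List.len_eq]; exact_mod_cast hA0lt)
  rw [hlook1, hlook2]
  have hdiff : ((max a0 b0 : Nat) : Int) - ((min a0 b0 : Nat) : Int) =
      ((max a0 b0 - min a0 b0 : Nat) : Int) := by push_cast; omega
  have hinner1 : PySem.List.pyGetD ((PySem.List.pyRange ((min a0 b0 : Nat) : Int)
      (PySem.List.len rows) 1).map (fun b =>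
        pvRmax (fun r => (pvBBounds coordinates).1.getD r 0)
          (PySem.List.pyGetD rows ((min a0 b0 : Nat) : Int) 0) (PySem.List.pyGetD rows b 0)))
      (((max a0 b0 : Nat) : Int) - ((min a0 b0 : Nat) : Int)) 0 =
      pvRmax (fun r => (pvBBounds coordinates).1.getD r 0)
        (PySem.List.pyGetD rows ((min a0 b0 : Nat) : Int) 0)
        (PySem.List.pyGetD rows ((max a0 b0 : Nat) : Int) 0) := by
    rw [hdiff, PySem.List.pyGetD_map_pyRange_one _ _ _ _ _
      (by simp only [PySem.List.len_eq]; omega)]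
    have he : ((min a0 b0 : Nat) : Int) + ((max a0 b0 - min a0 b0 : Nat) : Int) =
        ((max a0 b0 : Nat) : Int) := by push_cast; omega
    rw [he]
  have hinner2 : PySem.List.pyGetD ((PySem.List.pyRange ((min a0 b0 : Nat) : Int)
      (PySem.List.len rows) 1).map (fun b =>
        pvRmin (fun r => (pvBBounds coordinates).2.getD r 0)
          (PySem.List.pyGetD rows ((min a0 b0 : Nat) : Int) 0) (PySem.List.pyGetD rows b 0)))
      (((max a0 b0 : Nat) : Int) - ((min a0 b0 : Nat) : Int)) 0 =
      pvRmin (fun r => (pvBBounds coordinates).2.getD r 0)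
        (PySem.List.pyGetD rows ((min a0 b0 : Nat) : Int) 0)
        (PySem.List.pyGetD rows ((max a0 b0 : Nat) : Int) 0) := by
    rw [hdiff, PySem.List.pyGetD_map_pyRange_one _ _ _ _ _
      (by simp only [PySem.List.len_eq]; omega)]
    have he : ((min a0 b0 : Nat) : Int) + ((max a0 b0 - min a0 b0 : Nat) : Int) =
        ((max a0 b0 : Nat) : Int) := by push_cast; omega
    rw [he]
  rw [hinner1, hinner2]
  rw [hgetA, hgetB]
  -- normalise B's column selections to min/max
  have hleft : (if p.2 < q.2 then p.2 else q.2) = min p.2 q.2 := by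
    rw [min_def]; split_ifs <;> omega
  have hright : (if p.2 > q.2 then p.2 else q.2) = max p.2 q.2 := by
    rw [max_def]; split_ifs <;> omega
  rw [hleft, hright]
  -- A's row-validity loop as a quantifier
  have hvalid : ((PySem.List.pyRange (min p.1 q.1) (max p.1 q.1 + 1) 1).foldl (fun ok row =>
      if min p.2 q.2 < PySem.List.pyGetD ((pvASorted coordinates).getD row []) 0 0 ∨
         max p.2 q.2 > PySem.List.pyGetD ((pvASorted coordinates).getD row []) (-1) 0
      then false else ok) true) = true ↔
      ∀ row ∈ PySem.List.pyRange (min p.1 q.1) (max p.1 q.1 + 1) 1,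
        pvF coordinates row ≤ min p.2 q.2 ∧ max p.2 q.2 ≤ pvG coordinates row := by
    rw [PySem.List.foldl_congr_mem _ _ (fun ok row =>
      if (decide (min p.2 q.2 < pvF coordinates row ∨
          max p.2 q.2 > pvG coordinates row)) = true then false else ok) _ ?_]
    · rw [PySem.List.foldl_if_false_eq]
      simp only [Bool.true_and, Bool.not_eq_true', List.any_eq_false]
      constructor
      · intro h row hrow
        have := h row hrow
        rw [decide_eq_true_eq] at this
        omega
      · intro h row hrow
        have := h row hrow
        rw [decide_eq_true_eq]
        omega
    · intro ok row _
      dsimp only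
      rw [(pvLink coordinates row).1, (pvLink coordinates row).2]
      by_cases hC : min p.2 q.2 < pvF coordinates row ∨ max p.2 q.2 > pvG coordinates row
      · rw [if_pos hC, if_pos (by simpa using hC)]
      · rw [if_neg hC, if_neg (by simpa using hC)]
  -- B's table condition as the same quantifier
  have hminle : min p.1 q.1 ≤ max p.1 q.1 := le_trans (min_le_left _ _) (le_max_left _ _)
  have hcond : (pvRmax (fun r => (pvBBounds coordinates).1.getD r 0) (min p.1 q.1)
        (max p.1 q.1) ≤ min p.2 q.2 ∧
      max p.2 q.2 ≤ pvRmin (fun r => (pvBBounds coordinates).2.getD r 0) (min p.1 q.1)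
        (max p.1 q.1)) ↔
      ∀ row ∈ PySem.List.pyRange (min p.1 q.1) (max p.1 q.1 + 1) 1,
        pvF coordinates row ≤ min p.2 q.2 ∧ max p.2 q.2 ≤ pvG coordinates row := by
    rw [pvRmax_le_iff _ _ _ _ hminle, pv_le_pvRmin_iff _ _ _ _ hminle]
    unfold pvF pvG
    constructor
    · intro h row hrow
      exact ⟨h.1 row hrow, h.2 row hrow⟩
    · intro h
      exact ⟨fun row hrow => (h row hrow).1, fun row hrow => (h row hrow).2⟩
  -- finish: both branches agree
  by_cases hc : ∀ row ∈ PySem.List.pyRange (min p.1 q.1) (max p.1 q.1 + 1) 1,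
      pvF coordinates row ≤ min p.2 q.2 ∧ max p.2 q.2 ≤ pvG coordinates row
  · rw [if_pos (hvalid.mpr hc), if_pos (hcond.mpr hc)]
    rw [max_def]
    split_ifs <;> omega
  · rw [if_neg (fun h => hc (hvalid.mp h)), if_neg (fun h => hc (hcond.mp h))]
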